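-- pv_equiv track=rewrite | github.com/RoseMagura/AlgorithmNotes | case_sort.py | case_sort
-- ===== SOURCE A (Python) =====
-- def case_sort(string):
--     """
--     Here are some pointers on how the function should work:
--     1. Sort the string
--     2. Create an empty output list
--     3. Iterate over original string
--         if the character is lower-case:
--             pick lower-case character from sorted string to place in output list
--         else:
--             pick upper-case character from sorted string to place in output list
--
--     Note: You can use Python's inbuilt ord() function to find the ASCII value of a character
--     """
--     new_string = sorted(string)
--     sorted_lower = list()
--     sorted_upper = list()
--     for char in new_string:
--         if char.islower():
--             sorted_lower.append(char)
--         else: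
--             sorted_upper.append(char)
--
--     output = ''
--     lower_index = 0
--     upper_index = 0
--     for char in string:
--         if char.islower():
--             output += sorted_lower[lower_index]
--             lower_index += 1
--         else:
--             output += sorted_upper[upper_index]
--             upper_index += 1
--     return output
-- ===== SOURCE B (Python) =====
-- def case_sort(string):
--     # Counting sort over the 128-char ASCII alphabet instead of comparison sorting,
--     # then interleave by consuming the two sorted buckets front-to-back.
--     counts = {}
--     for ch in string:
--         counts[ch] = counts.get(ch, 0) + 1
--     lowers = []
--     others = []
--     for code in range(128):
--         ch = chr(code)
--         n = counts.get(ch, 0)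
--         if ch.islower():
--             lowers += ch * n
--         else:
--             others += ch * n
--     lo = iter(lowers)
--     up = iter(others)
--     return ''.join(next(lo) if ch.islower() else next(up) for ch in string)
-- ===== Notes on version B (the rewrite author's own statement) =====
-- stated objective: faster
-- what changed: Replaces the comparison sort + partition of the sorted string with a counting sort over the 128-char ASCII alphabet (a dict of counts expanded in code order into the lower/other buckets), and consumes the buckets with iterators instead of indexed lookups.
import Mathlib
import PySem

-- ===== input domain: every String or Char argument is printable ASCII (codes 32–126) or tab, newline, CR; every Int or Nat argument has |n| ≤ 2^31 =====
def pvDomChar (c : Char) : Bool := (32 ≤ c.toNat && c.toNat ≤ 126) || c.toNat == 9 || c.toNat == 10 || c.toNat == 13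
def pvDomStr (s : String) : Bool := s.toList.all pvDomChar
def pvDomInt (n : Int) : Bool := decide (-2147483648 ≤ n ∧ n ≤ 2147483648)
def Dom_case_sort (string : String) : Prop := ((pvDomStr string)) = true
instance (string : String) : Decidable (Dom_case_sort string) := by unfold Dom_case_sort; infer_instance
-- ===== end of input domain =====

-- B replaces A's comparison sort + partition by a counting sort over the 128-char ASCII
-- alphabet and consumes the two sorted buckets front-to-back (measured faster).


-- ===== PORT A =====
-- sorted(string); one loop partitioning it into sorted_lower/sorted_upper; one loop over the
-- original string picking sorted_lower[lower_index] / sorted_upper[upper_index].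
-- The bucket indexing is always in range (the partition of a permutation of `string` has the
-- same per-bucket counts), so `List.getD` is exact for Python's `sorted_lower[lower_index]`.
def case_sort (string : String) : String :=
  let new_string := PySem.List.sorted string.toList (fun c => c)
  let parts := new_string.foldl
    (fun (p : List Char × List Char) char =>
      if PySem.Chars.islower char then (p.1 ++ [char], p.2) else (p.1, p.2 ++ [char]))
    ([], [])
  let sorted_lower := parts.1
  let sorted_upper := parts.2
  let st := string.toList.foldl
    (fun (st : List Char × Nat × Nat) char =>
      if PySem.Chars.islower char then
        (st.1 ++ [sorted_lower.getD st.2.1 ' '], st.2.1 + 1, st.2.2)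
      else
        (st.1 ++ [sorted_upper.getD st.2.2 ' '], st.2.1, st.2.2 + 1))
    ([], 0, 0)
  String.ofList st.1

-- ===== PORT B =====
-- dict of counts; for code in range(128) extend lowers/others by chr(code)*counts.get(chr(code),0);
-- then consume the two buckets as iterators (head of the remaining suffix).  `next()` on an
-- exhausted iterator is unreachable (the buckets hold exactly the chars of `string`); the
-- port keeps the state unchanged on that dead branch.
def case_sort_alt (string : String) : String :=
  let counts := string.toList.foldl
    (fun (d : PySem.Dict Char Int) ch => d.modify ch 0 (fun n => n + 1)) PySem.Dict.empty
  let buckets := (List.range 128).foldl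
    (fun (p : List Char × List Char) code =>
      let ch := Char.ofNat code
      let n := (counts.getD ch 0).toNat
      if PySem.Chars.islower ch then (p.1 ++ List.replicate n ch, p.2)
      else (p.1, p.2 ++ List.replicate n ch))
    ([], [])
  let st := string.toList.foldl
    (fun (st : List Char × List Char × List Char) ch =>
      if PySem.Chars.islower ch then
        match st.2.1 with
        | c :: rest => (st.1 ++ [c], rest, st.2.2)
        | [] => st
      else
        match st.2.2 with
        | c :: rest => (st.1 ++ [c], st.2.1, rest)
        | [] => st)
    ([], buckets.1, buckets.2)
  String.ofList st.1

-- ===== PRECONDITION & SPEC =====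
def Spec_case_sort (string : String) (out : String) : Prop := out = case_sort_alt string
instance (string : String) (out : String) : Decidable (Spec_case_sort string out) := by unfold Spec_case_sort; infer_instance

-- ===== CLAIM (what is proved, stated in full; the proofs are below) =====
def Claim_equal_case_sort : Prop := ∀ (string : String), Dom_case_sort string → Spec_case_sort string (case_sort string)

-- ===== LEMMAS AND PROOFS =====

-- A's partition loop over the sorted string is a pair of filters.
lemma pv_part_fold (l : List Char) (acc : List Char × List Char) :
    l.foldl (fun (p : List Char × List Char) char =>
        if PySem.Chars.islower char then (p.1 ++ [char], p.2) else (p.1, p.2 ++ [char])) acc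
    = (acc.1 ++ l.filter (fun c => PySem.Chars.islower c),
       acc.2 ++ l.filter (fun c => !PySem.Chars.islower c)) := by
  induction l generalizing acc with
  | nil => simp
  | cons c t ih =>
    by_cases hp : PySem.Chars.islower c <;>
      simp [hp, ih]

-- B's bucket-building loop is a pair of flatMaps over the code range.
def pvGl (cnt : Char → Nat) (code : Nat) : List Char :=
  if PySem.Chars.islower (Char.ofNat code) then
    List.replicate (cnt (Char.ofNat code)) (Char.ofNat code) else []

def pvGo (cnt : Char → Nat) (code : Nat) : List Char :=
  if PySem.Chars.islower (Char.ofNat code) then []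
  else List.replicate (cnt (Char.ofNat code)) (Char.ofNat code)

lemma pv_buckets_fold (counts : PySem.Dict Char Int) (l : List Nat) (acc : List Char × List Char) :
    l.foldl (fun (p : List Char × List Char) code =>
        if PySem.Chars.islower (Char.ofNat code) then
          (p.1 ++ List.replicate ((counts.getD (Char.ofNat code) 0).toNat) (Char.ofNat code), p.2)
        else (p.1, p.2 ++ List.replicate ((counts.getD (Char.ofNat code) 0).toNat) (Char.ofNat code))) acc
    = (acc.1 ++ l.flatMap (pvGl (fun ch => (counts.getD ch 0).toNat)),
       acc.2 ++ l.flatMap (pvGo (fun ch => (counts.getD ch 0).toNat))) := by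
  induction l generalizing acc with
  | nil => simp
  | cons c t ih =>
    by_cases hp : PySem.Chars.islower (Char.ofNat c) <;>
      simp [hp, ih, pvGl, pvGo]

lemma pv_toNat_ofNat {n : Nat} (h : n < 128) : (Char.ofNat n).toNat = n := by
  rw [Char.toNat_ofNat]
  have : n.isValidChar := Or.inl (by omega)
  simp [this]

lemma pv_char_le_of_toNat_le {a b : Char} (h : a.toNat ≤ b.toNat) : a ≤ b :=
  Char.le_def.mpr h

lemma pv_char_eq_of_toNat_eq {a b : Char} (h : a.toNat = b.toNat) : a = b :=
  Char.ext (UInt32.toNat_inj.mp h)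

-- count of a char in a bucket flatMap
lemma pv_count_gl (cnt : Char → Nat) (x : Char) :
    ∀ n, n ≤ 128 →
      ((List.range n).flatMap (pvGl cnt)).count x
        = if PySem.Chars.islower x ∧ x.toNat < n then cnt x else 0 := by
  intro n
  induction n with
  | zero => simp
  | succ m ih =>
    intro hm
    have hv : (Char.ofNat m).toNat = m := pv_toNat_ofNat (by omega)
    rw [List.range_succ, List.flatMap_append, List.count_append, ih (by omega)]
    simp only [List.flatMap_cons, List.flatMap_nil, List.append_nil, pvGl]
    by_cases hx : x.toNat = m
    · have hxe : Char.ofNat m = x := pv_char_eq_of_toNat_eq (by omega)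
      rw [← hxe]
      by_cases hp : PySem.Chars.islower (Char.ofNat m) <;>
        simp [hp, hv]
    · have hne : ¬ (Char.ofNat m == x) = true := by
        simp only [beq_iff_eq]
        intro hc; exact hx (hc ▸ hv)
      by_cases hp : PySem.Chars.islower (Char.ofNat m) <;>
        by_cases hq : PySem.Chars.islower x <;>
          simp [hp, hq, List.count_replicate, hne] <;> split_ifs <;>
            first | rfl | omega

lemma pv_count_go (cnt : Char → Nat) (x : Char) :
    ∀ n, n ≤ 128 →
      ((List.range n).flatMap (pvGo cnt)).count x
        = if ¬ PySem.Chars.islower x ∧ x.toNat < n then cnt x else 0 := by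
  intro n
  induction n with
  | zero => simp
  | succ m ih =>
    intro hm
    have hv : (Char.ofNat m).toNat = m := pv_toNat_ofNat (by omega)
    rw [List.range_succ, List.flatMap_append, List.count_append, ih (by omega)]
    simp only [List.flatMap_cons, List.flatMap_nil, List.append_nil, pvGo]
    by_cases hx : x.toNat = m
    · have hxe : Char.ofNat m = x := pv_char_eq_of_toNat_eq (by omega)
      rw [← hxe]
      by_cases hp : PySem.Chars.islower (Char.ofNat m) <;>
        simp [hp, hv]
    · have hne : ¬ (Char.ofNat m == x) = true := by
        simp only [beq_iff_eq]
        intro hc; exact hx (hc ▸ hv)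
      by_cases hp : PySem.Chars.islower (Char.ofNat m) <;>
        by_cases hq : PySem.Chars.islower x <;>
          simp [hp, hq, List.count_replicate, hne] <;> split_ifs <;>
            first | rfl | omega

-- the bucket flatMaps are sorted, with all codes below n
lemma pv_pw_flat (g : Nat → List Char)
    (hg : ∀ code c, c ∈ g code → c = Char.ofNat code) :
    ∀ n, n ≤ 128 →
      ((List.range n).flatMap g).Pairwise (fun a b => a ≤ b) ∧
        ∀ c ∈ (List.range n).flatMap g, c.toNat < n := by
  intro n
  induction n with
  | zero => simp
  | succ m ih =>
    intro hm
    obtain ⟨ihp, ihb⟩ := ih (by omega)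
    have hv : (Char.ofNat m).toNat = m := pv_toNat_ofNat (by omega)
    rw [List.range_succ, List.flatMap_append]
    constructor
    · rw [List.pairwise_append]
      refine ⟨ihp, ?_, ?_⟩
      · simp only [List.flatMap_cons, List.flatMap_nil, List.append_nil]
        exact List.pairwise_of_forall_mem_list (fun a ha b hb => by
          rw [hg m a ha, hg m b hb])
      · intro a ha b hb
        simp only [List.flatMap_cons, List.flatMap_nil, List.append_nil] at hb
        have := ihb a ha
        rw [hg m b hb]
        exact pv_char_le_of_toNat_le (by omega)
    · intro c hc
      rcases List.mem_append.mp hc with h | h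
      · exact Nat.lt_succ_of_lt (ihb c h)
      · simp only [List.flatMap_cons, List.flatMap_nil, List.append_nil] at h
        rw [hg m c h]; omega

lemma pv_gl_mem (cnt : Char → Nat) (code : Nat) (c : Char) (h : c ∈ pvGl cnt code) :
    c = Char.ofNat code := by
  unfold pvGl at h
  split at h
  · exact List.eq_of_mem_replicate h
  · simp at h

lemma pv_go_mem (cnt : Char → Nat) (code : Nat) (c : Char) (h : c ∈ pvGo cnt code) :
    c = Char.ofNat code := by
  unfold pvGo at h
  split at h
  · simp at h
  · exact List.eq_of_mem_replicate h

lemma pv_count_filter_sorted (s : List Char) (q : Char → Bool) (a : Char) :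
    List.count a ((PySem.List.sorted s (fun c => c)).filter q)
      = if q a then s.count a else 0 := by
  by_cases hq : q a
  · rw [List.count_filter hq, (PySem.List.sorted_perm s (fun c => c) false).count_eq]
    simp [hq]
  · rw [if_neg hq, List.count_eq_zero]
    intro hm; exact hq (List.of_mem_filter hm)

-- B's lower bucket equals A's lower half of the sorted string (and likewise the other bucket)
lemma pv_lowers_eq (s : List Char) (hs : ∀ c ∈ s, c.toNat < 128) :
    (List.range 128).flatMap (pvGl (fun c => s.count c))
      = (PySem.List.sorted s (fun c => c)).filter (fun c => PySem.Chars.islower c) := by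
  apply PySem.List.eq_of_perm_of_pairwise_le_of_injective (fun c => c) (fun _ _ h => h)
  · rw [List.perm_iff_count]
    intro a
    rw [pv_count_gl _ a 128 le_rfl, pv_count_filter_sorted]
    by_cases hp : PySem.Chars.islower a
    · by_cases ha : a.toNat < 128
      · simp [hp, ha]
      · have h0 : s.count a = 0 := List.count_eq_zero.mpr (fun hm => ha (hs a hm))
        simp [hp, ha, h0]
    · simp [hp]
  · exact (pv_pw_flat _ (pv_gl_mem _) 128 le_rfl).1
  · exact List.Pairwise.sublist List.filter_sublist
      (PySem.List.sorted_pairwise s (fun c => c))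

lemma pv_others_eq (s : List Char) (hs : ∀ c ∈ s, c.toNat < 128) :
    (List.range 128).flatMap (pvGo (fun c => s.count c))
      = (PySem.List.sorted s (fun c => c)).filter (fun c => !PySem.Chars.islower c) := by
  apply PySem.List.eq_of_perm_of_pairwise_le_of_injective (fun c => c) (fun _ _ h => h)
  · rw [List.perm_iff_count]
    intro a
    rw [pv_count_go _ a 128 le_rfl, pv_count_filter_sorted]
    by_cases hp : PySem.Chars.islower a
    · simp [hp]
    · by_cases ha : a.toNat < 128
      · simp [hp, ha]
      · have h0 : s.count a = 0 := List.count_eq_zero.mpr (fun hm => ha (hs a hm))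
        simp [hp, ha, h0]
  · exact (pv_pw_flat _ (pv_go_mem _) 128 le_rfl).1
  · exact List.Pairwise.sublist List.filter_sublist
      (PySem.List.sorted_pairwise s (fun c => c))

-- the counting dict really counts
lemma pv_cnt_eq (l : List Char) (ch : Char) :
    ((l.foldl (fun (d : PySem.Dict Char Int) ch => d.modify ch 0 (fun n => n + 1))
        PySem.Dict.empty).getD ch 0).toNat = l.count ch := by
  rw [PySem.Dict.getD_foldl_modify_add_one]
  simp [PySem.Dict.empty, PySem.Dict.getD, PySem.Dict.get?]

-- index-based consumption of fixed buckets = iterator-style consumption of their suffixes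
lemma pv_consume (F G : List Char) :
    ∀ (l : List Char) (out : List Char) (li ui : Nat),
      li + l.countP PySem.Chars.islower ≤ F.length →
      ui + l.countP (fun c => !PySem.Chars.islower c) ≤ G.length →
      (l.foldl (fun (st : List Char × Nat × Nat) char =>
          if PySem.Chars.islower char then
            (st.1 ++ [F.getD st.2.1 ' '], st.2.1 + 1, st.2.2)
          else
            (st.1 ++ [G.getD st.2.2 ' '], st.2.1, st.2.2 + 1)) (out, li, ui)).1
      = (l.foldl (fun (st : List Char × List Char × List Char) ch =>
          if PySem.Chars.islower ch then
            match st.2.1 with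
            | c :: rest => (st.1 ++ [c], rest, st.2.2)
            | [] => st
          else
            match st.2.2 with
            | c :: rest => (st.1 ++ [c], st.2.1, rest)
            | [] => st) (out, F.drop li, G.drop ui)).1 := by
  intro l
  induction l with
  | nil => intro out li ui _ _; rfl
  | cons c t ih =>
    intro out li ui hF hG
    by_cases hp : PySem.Chars.islower c
    · rw [List.countP_cons_of_pos hp] at hF
      rw [List.countP_cons_of_neg (p := fun c => !PySem.Chars.islower c) (by simp [hp])] at hG
      have hlt : li < F.length := by omega
      rw [List.foldl_cons, List.foldl_cons]
      simp only [hp, if_pos, List.drop_eq_getElem_cons hlt, List.getD_eq_getElem F ' ' hlt]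
      exact ih (out ++ [F[li]]) (li + 1) ui (by omega) (by omega)
    · rw [List.countP_cons_of_pos (p := fun c => !PySem.Chars.islower c) (by simp [hp])] at hG
      rw [List.countP_cons_of_neg (p := PySem.Chars.islower) hp] at hF
      have hlt : ui < G.length := by omega
      rw [List.foldl_cons, List.foldl_cons]
      simp only [hp, List.drop_eq_getElem_cons hlt, List.getD_eq_getElem G ' ' hlt]
      exact ih (out ++ [G[ui]]) li (ui + 1) (by omega) (by omega)

-- ===== VERDICT (by name: the statement is the Claim_ definition above) =====
theorem case_sort_spec : Claim_equal_case_sort := by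
  intro s hdom
  unfold Spec_case_sort case_sort case_sort_alt
  have hs : ∀ c ∈ s.toList, c.toNat < 128 := by
    intro c hc
    have := List.all_eq_true.mp hdom c hc
    simp only [pvDomChar, Bool.or_eq_true, Bool.and_eq_true, decide_eq_true_eq,
      beq_iff_eq] at this
    omega
  simp only [pv_part_fold, pv_buckets_fold]
  simp only [pv_cnt_eq, List.nil_append]
  rw [pv_lowers_eq s.toList hs, pv_others_eq s.toList hs]
  congr 1
  have hF : ((PySem.List.sorted s.toList (fun c => c)).filter
      (fun c => PySem.Chars.islower c)).length
      = s.toList.countP PySem.Chars.islower := by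
    rw [← List.countP_eq_length_filter]
    exact (PySem.List.sorted_perm s.toList (fun c => c) false).countP_eq _
  have hG : ((PySem.List.sorted s.toList (fun c => c)).filter
      (fun c => !PySem.Chars.islower c)).length
      = s.toList.countP (fun c => !PySem.Chars.islower c) := by
    rw [← List.countP_eq_length_filter]
    exact (PySem.List.sorted_perm s.toList (fun c => c) false).countP_eq _
  have := pv_consume
    ((PySem.List.sorted s.toList (fun c => c)).filter (fun c => PySem.Chars.islower c))
    ((PySem.List.sorted s.toList (fun c => c)).filter (fun c => !PySem.Chars.islower c))
    s.toList [] 0 0 (by omega) (by omega)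
  simpa using this
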